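-- pv_equiv track=rewrite | github.com/Dineshk-FT/fucy_backend | app/Methods/helpers.py | get_highest_rating
-- ===== SOURCE A (Python) =====
-- def get_highest_rating(ratings):
--     rating_order = {"Very Low": 1, "Low": 2, "Medium": 3, "High": 4}
--     highest_rating = None
--
--     for rating in ratings:
--         normalized_rating = rating.capitalize()  # Normalize to title case
--         if normalized_rating in rating_order:
--             if (
--                 highest_rating is None
--                 or rating_order[normalized_rating] > rating_order[highest_rating]
--             ):
--                 highest_rating = normalized_rating
--
--     return highest_rating
-- ===== SOURCE B (Python) =====
-- def get_highest_rating(ratings):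
--     # Different decomposition: build the set of normalized ratings once, then
--     # scan the priority levels in descending order and return the first present.
--     normalized = {rating.capitalize() for rating in ratings}
--     for level in ["High", "Medium", "Low", "Very Low"]:
--         if level in normalized:
--             return level
--     return None
-- ===== Notes on version B (the rewrite author's own statement) =====
-- stated objective: alternative
-- what changed: Instead of a max-scan over the data with a rank dict, B builds the set of capitalized ratings once and walks the fixed priority levels in descending order, returning the first level present.
import Mathlib
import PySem

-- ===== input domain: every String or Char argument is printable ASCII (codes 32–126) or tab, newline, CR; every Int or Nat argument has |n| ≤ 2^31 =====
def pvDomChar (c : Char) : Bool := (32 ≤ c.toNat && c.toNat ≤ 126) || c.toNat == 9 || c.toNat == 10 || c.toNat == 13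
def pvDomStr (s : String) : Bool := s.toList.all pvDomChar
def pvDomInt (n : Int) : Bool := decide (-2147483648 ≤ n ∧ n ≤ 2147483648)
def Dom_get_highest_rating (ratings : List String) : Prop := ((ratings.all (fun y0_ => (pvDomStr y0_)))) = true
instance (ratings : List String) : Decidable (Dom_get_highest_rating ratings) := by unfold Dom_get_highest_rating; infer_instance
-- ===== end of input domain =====

-- B replaces A's max-scan over the data by a set of capitalized ratings plus a
-- descending walk over the fixed priority levels (alternative decomposition, same cost).


-- ===== PORT A =====
-- s.capitalize() : first char uppercased, the rest lowercased (exact on ASCII; shared by both ports)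
def pyCapitalize (s : String) : String :=
  match s.toList with
  | [] => ""
  | c :: cs => String.ofList (PySem.Chars.upperChar c :: PySem.Chars.lower cs)

-- the rating_order dict of A (built once before the loop in the Python)
def pvRatingOrder : PySem.Dict String Int :=
  ((((PySem.Dict.empty).insert "Very Low" 1).insert "Low" 2).insert "Medium" 3).insert "High" 4

-- A's loop body; rating_order[highest_rating] never raises (highest_rating is always a key), ported as getD
def pvStepA (highest_rating : Option String) (rating : String) : Option String :=
  let normalized_rating := pyCapitalize rating
  if pvRatingOrder.contains normalized_rating then
    match highest_rating with
    | none => some normalized_rating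
    | some h =>
      if pvRatingOrder.getD h 0 < pvRatingOrder.getD normalized_rating 0 then some normalized_rating
      else some h
  else highest_rating

def get_highest_rating (ratings : List String) : Option String :=
  ratings.foldl pvStepA none

-- ===== PORT B =====
-- the for-loop over the priority levels: first level contained in the set
def pvFirstLevel : List String → PySem.Set String → Option String
  | [], _ => none
  | l :: ls, s => if s.contains l then some l else pvFirstLevel ls s

def get_highest_rating_alt (ratings : List String) : Option String :=
  let normalized : PySem.Set String := PySem.Set.ofList (ratings.map pyCapitalize)
  pvFirstLevel ["High", "Medium", "Low", "Very Low"] normalized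

-- ===== PRECONDITION & SPEC =====
def Spec_get_highest_rating (ratings : List String) (out : Option String) : Prop := out = get_highest_rating_alt ratings
instance (ratings : List String) (out : Option String) : Decidable (Spec_get_highest_rating ratings out) := by unfold Spec_get_highest_rating; infer_instance

-- ===== CLAIM (what is proved, stated in full; the proofs are below) =====
def Claim_equal_get_highest_rating : Prop := ∀ (ratings : List String), Dom_get_highest_rating ratings → Spec_get_highest_rating ratings (get_highest_rating ratings)

-- ===== LEMMAS AND PROOFS =====

-- rank of a rating string (0 = not a rating), and the rating of a rank
def pvRnk (s : String) : Nat :=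
  if s = "High" then 4 else if s = "Medium" then 3 else if s = "Low" then 2
  else if s = "Very Low" then 1 else 0

def pvOfRank (n : Nat) : Option String :=
  if n = 4 then some "High" else if n = 3 then some "Medium" else if n = 2 then some "Low"
  else if n = 1 then some "Very Low" else none

theorem pvRnk_le (s : String) : pvRnk s ≤ 4 := by
  unfold pvRnk; split_ifs <;> omega

theorem lowerChar_ne_L (c : Char) : PySem.Chars.lowerChar c ≠ 'L' := by
  unfold PySem.Chars.lowerChar
  by_cases h : PySem.Chars.isupper c = true
  · simp only [h, if_true]
    have hb : 65 ≤ c.toNat ∧ c.toNat ≤ 90 := by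
      simp only [PySem.Chars.isupper, Bool.and_eq_true, decide_eq_true_eq, Char.le_def] at h
      exact ⟨h.1, h.2⟩
    intro he
    have h2 := congrArg Char.toNat he
    rw [Char.toNat_ofNat] at h2
    have hv : (c.toNat + 32).isValidChar := by constructor; omega
    simp only [hv, if_true] at h2
    have : ('L').toNat = 76 := by decide
    omega
  · simp only [h]
    intro he
    subst he
    exact h (by decide)

theorem cap_ne_VL (r : String) : pyCapitalize r ≠ "Very Low" := by
  unfold pyCapitalize
  cases hm : r.toList with
  | nil => decide
  | cons c cs =>
    intro he
    have h2 : PySem.Chars.upperChar c :: PySem.Chars.lower cs = "Very Low".toList := by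
      simpa using congrArg String.toList he
    have h3 : PySem.Chars.lower cs = ['e', 'r', 'y', ' ', 'L', 'o', 'w'] := by
      have : ("Very Low".toList) = ['V', 'e', 'r', 'y', ' ', 'L', 'o', 'w'] := by decide
      rw [this] at h2
      exact (List.cons.injEq _ _ _ _).mp h2 |>.2
    have h4 : 'L' ∈ List.map PySem.Chars.lowerChar cs := by
      rw [show List.map PySem.Chars.lowerChar cs = PySem.Chars.lower cs from rfl, h3]
      decide
    obtain ⟨c', -, hc'⟩ := List.mem_map.mp h4
    exact lowerChar_ne_L c' hc'

theorem stepA_eq (k : Nat) (hk : k ≤ 4) (r : String) :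
    pvStepA (pvOfRank k) r = pvOfRank (max k (pvRnk (pyCapitalize r))) := by
  have hvl := cap_ne_VL r
  by_cases h4 : pyCapitalize r = "High"
  · simp only [pvStepA]; rw [h4]; interval_cases k <;> decide
  · by_cases h3 : pyCapitalize r = "Medium"
    · simp only [pvStepA]; rw [h3]; interval_cases k <;> decide
    · by_cases h2 : pyCapitalize r = "Low"
      · simp only [pvStepA]; rw [h2]; interval_cases k <;> decide
      · have hc : pvRatingOrder.contains (pyCapitalize r) = false := by
          simp [pvRatingOrder, PySem.Dict.contains_insert, PySem.Dict.contains_empty,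
            h4, h3, h2, hvl]
        have hr : pvRnk (pyCapitalize r) = 0 := by
          simp [pvRnk, h4, h3, h2, hvl]
        simp [pvStepA, hc, hr]

theorem foldA_eq (rs : List String) :
    ∀ k, k ≤ 4 →
      rs.foldl pvStepA (pvOfRank k) =
        pvOfRank (rs.foldl (fun a r => max a (pvRnk (pyCapitalize r))) k) := by
  induction rs with
  | nil => intro k _; rfl
  | cons r rs ih =>
    intro k hk
    simp only [List.foldl_cons]
    rw [stepA_eq k hk r]
    exact ih _ (by have := pvRnk_le (pyCapitalize r); omega)

-- facts about the max-fold
theorem le_foldMax (m : List String) : ∀ a : Nat, a ≤ m.foldl (fun a s => max a (pvRnk s)) a := by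
  induction m with
  | nil => intro a; simp
  | cons s m ih =>
    intro a
    simp only [List.foldl_cons]
    exact le_trans (le_max_left a (pvRnk s)) (ih _)

theorem mem_le_foldMax (m : List String) :
    ∀ a : Nat, ∀ s ∈ m, pvRnk s ≤ m.foldl (fun a s => max a (pvRnk s)) a := by
  induction m with
  | nil => intro a s hs; simp at hs
  | cons t m ih =>
    intro a s hs
    simp only [List.foldl_cons]
    rcases List.mem_cons.mp hs with h | h
    · subst h
      exact le_trans (le_max_right a (pvRnk s)) (le_foldMax m _)
    · exact ih _ s h

theorem foldMax_attained (m : List String) :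
    ∀ a : Nat, m.foldl (fun a s => max a (pvRnk s)) a = a ∨
      ∃ s ∈ m, pvRnk s = m.foldl (fun a s => max a (pvRnk s)) a := by
  induction m with
  | nil => intro a; left; rfl
  | cons t m ih =>
    intro a
    simp only [List.foldl_cons]
    rcases ih (max a (pvRnk t)) with h | ⟨s, hs, h⟩
    · rw [h]
      rcases Nat.le_total a (pvRnk t) with hle | hle
      · right; exact ⟨t, List.mem_cons_self .., by omega⟩
      · left; omega
    · right; exact ⟨s, List.mem_cons_of_mem _ hs, h⟩

theorem pvRnk_eq_four {s : String} (h : pvRnk s = 4) : s = "High" := by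
  unfold pvRnk at h; split_ifs at h <;> simp_all
theorem pvRnk_eq_three {s : String} (h : pvRnk s = 3) : s = "Medium" := by
  unfold pvRnk at h; split_ifs at h <;> simp_all
theorem pvRnk_eq_two {s : String} (h : pvRnk s = 2) : s = "Low" := by
  unfold pvRnk at h; split_ifs at h <;> simp_all
theorem pvRnk_eq_one {s : String} (h : pvRnk s = 1) : s = "Very Low" := by
  unfold pvRnk at h; split_ifs at h <;> simp_all

theorem B_eq (ratings : List String) :
    get_highest_rating_alt ratings =
      pvOfRank ((ratings.map pyCapitalize).foldl (fun a s => max a (pvRnk s)) 0) := by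
  have hnotVL : "Very Low" ∉ ratings.map pyCapitalize := by
    intro h
    obtain ⟨r, -, hr⟩ := List.mem_map.mp h
    exact cap_ne_VL r hr
  have hatt := foldMax_attained (ratings.map pyCapitalize) 0
  have hmemrnk := mem_le_foldMax (ratings.map pyCapitalize) 0
  have hle4 : (ratings.map pyCapitalize).foldl (fun a s => max a (pvRnk s)) 0 ≤ 4 := by
    rcases hatt with h | ⟨s, -, h⟩
    · omega
    · rw [← h]; exact pvRnk_le s
  show pvFirstLevel ["High", "Medium", "Low", "Very Low"]
      (PySem.Set.ofList (ratings.map pyCapitalize)) = pvOfRank _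
  generalize hg : (ratings.map pyCapitalize).foldl (fun a s => max a (pvRnk s)) 0 = n
    at hatt hmemrnk hle4 ⊢
  interval_cases n
  · -- n = 0 : no level is a member
    have h4 : "High" ∉ ratings.map pyCapitalize := fun h => by
      have := hmemrnk _ h; simp [pvRnk] at this
    have h3 : "Medium" ∉ ratings.map pyCapitalize := fun h => by
      have := hmemrnk _ h; simp [pvRnk] at this
    have h2 : "Low" ∉ ratings.map pyCapitalize := fun h => by
      have := hmemrnk _ h; simp [pvRnk] at this
    simp [pvFirstLevel, pvOfRank, PySem.Set.mem_ofList, h4, h3, h2, hnotVL]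
  · -- n = 1 : impossible, "Very Low" cannot be produced by capitalize
    rcases hatt with h | ⟨s, hs, h⟩
    · omega
    · exact absurd (pvRnk_eq_one h ▸ hs) hnotVL
  · -- n = 2 : Low present, High/Medium absent
    have hLow : "Low" ∈ ratings.map pyCapitalize := by
      rcases hatt with h | ⟨s, hs, h⟩
      · omega
      · exact pvRnk_eq_two h ▸ hs
    have h4 : "High" ∉ ratings.map pyCapitalize := fun h => by
      have := hmemrnk _ h; simp [pvRnk] at this
    have h3 : "Medium" ∉ ratings.map pyCapitalize := fun h => by
      have := hmemrnk _ h; simp [pvRnk] at this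
    simp [pvFirstLevel, pvOfRank, PySem.Set.mem_ofList, hLow, h4, h3]
  · -- n = 3 : Medium present, High absent
    have hMed : "Medium" ∈ ratings.map pyCapitalize := by
      rcases hatt with h | ⟨s, hs, h⟩
      · omega
      · exact pvRnk_eq_three h ▸ hs
    have h4 : "High" ∉ ratings.map pyCapitalize := fun h => by
      have := hmemrnk _ h; simp [pvRnk] at this
    simp [pvFirstLevel, pvOfRank, PySem.Set.mem_ofList, hMed, h4]
  · -- n = 4 : High present
    have hHigh : "High" ∈ ratings.map pyCapitalize := by
      rcases hatt with h | ⟨s, hs, h⟩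
      · omega
      · exact pvRnk_eq_four h ▸ hs
    simp [pvFirstLevel, pvOfRank, PySem.Set.mem_ofList, hHigh]

-- ===== VERDICT (by name: the statement is the Claim_ definition above) =====
theorem get_highest_rating_spec : Claim_equal_get_highest_rating := by
  intro ratings _
  show get_highest_rating ratings = get_highest_rating_alt ratings
  have hA : get_highest_rating ratings =
      pvOfRank (ratings.foldl (fun a r => max a (pvRnk (pyCapitalize r))) 0) := by
    show ratings.foldl pvStepA (pvOfRank 0) = _
    exact foldA_eq ratings 0 (by omega)
  rw [hA, B_eq, List.foldl_map]
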